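-- pv_equiv track=rewrite | github.com/NaomiLita/bioinformatics | Project_L5/L5/ex2.py | assemble_fragments
-- ===== SOURCE A (Python) =====
-- def find_best_overlap(current_seq, fragments, used_indices):
--     best_overlap = 0
--     best_fragment = None
--     best_index = None
--
--     for i, frag in enumerate(fragments):
--         if i in used_indices:
--             continue
--         # Check decreasing overlap lengths
--         for j in range(100, 10, -1):
--             if current_seq.endswith(frag[:j]):
--                 if j > best_overlap:
--                     best_overlap = j
--                     best_fragment = frag
--                     best_index = i
--     return best_fragment, best_index, best_overlap
--
-- def assemble_fragments(seqs):
--     reconstructed = seqs[0]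
--     used = {0}
--
--     while True:
--         next_frag, next_idx, overlap = find_best_overlap(reconstructed, seqs, used)
--         if next_frag is None or overlap < 10:
--             break
--         reconstructed += next_frag[overlap:]
--         used.add(next_idx)
--     return reconstructed
-- ===== SOURCE B (Python) =====
-- def assemble_fragments(seqs):
--     # Build, once, an index from fragment-prefix strings to (overlap_length, fragment_index)
--     # candidates; each greedy step then probes only the <=101 suffixes of the assembly,
--     # never rescanning the fragment list.
--     index = {}
--     for i, frag in enumerate(seqs):
--         for j in range(11, min(100, len(frag))):
--             index.setdefault(frag[:j], []).append((j, i))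
--         index.setdefault(frag[:100], []).append((100, i))
--     rec = seqs[0]
--     used = {0}
--     while True:
--         best = None
--         n = len(rec)
--         for k in range(0, min(100, n) + 1):
--             for (j, i) in index.get(rec[n - k:], ()):
--                 if i not in used and (best is None or j > best[0] or (j == best[0] and i < best[1])):
--                     best = (j, i)
--         if best is None:
--             break
--         j, i = best
--         rec += seqs[i][j:]
--         used.add(i)
--     return rec
-- ===== Notes on version B (the rewrite author's own statement) =====
-- stated objective: faster
-- what changed: B builds a hash index from fragment prefixes (keyed by the prefix string) once up front; each greedy step then looks up only the at-most-101 suffixes of the current assembly in that index and takes the (overlap,-index)-lexicographic best candidate, so the per-step scan over all fragments and all 90 overlap lengths disappears.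
import Mathlib
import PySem

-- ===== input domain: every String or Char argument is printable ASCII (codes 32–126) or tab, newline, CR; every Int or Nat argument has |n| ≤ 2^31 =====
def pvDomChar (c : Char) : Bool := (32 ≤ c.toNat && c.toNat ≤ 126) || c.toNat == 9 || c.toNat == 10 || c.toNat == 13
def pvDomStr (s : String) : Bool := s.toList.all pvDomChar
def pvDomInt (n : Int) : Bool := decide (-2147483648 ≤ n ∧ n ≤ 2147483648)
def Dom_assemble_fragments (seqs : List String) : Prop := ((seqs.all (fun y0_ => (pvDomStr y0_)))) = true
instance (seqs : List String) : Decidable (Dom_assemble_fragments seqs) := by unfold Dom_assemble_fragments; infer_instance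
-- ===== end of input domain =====

-- B replaces A's per-step scan over all fragments × 90 overlap lengths by a prefix index built
-- once (prefix string -> (overlap, index) candidates); each step probes only the ≤ 101 suffixes
-- of the current assembly and takes the (overlap, -index)-lexicographically best candidate.

-- ===== PORT A =====
-- inner loop body of find_best_overlap: state (best_overlap, best_fragment, best_index)
def fboInner (current_seq frag : String) (i : Int) :
    (Int × Option String × Option Int) → Int → (Int × Option String × Option Int) :=
  fun t j =>
    if PySem.Str.endswith current_seq (PySem.Str.slice frag none (some j)) then
      (if t.1 < j then (j, some frag, some i) else t)
    else t

def find_best_overlap (current_seq : String) (fragments : List String)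
    (used_indices : PySem.Set Int) : Option String × Option Int × Int :=
  let s := (PySem.List.enumerate fragments 0).foldl
    (fun s p =>
      if PySem.Set.contains used_indices p.1 then s
      else (PySem.List.pyRange 100 10 (-1)).foldl (fboInner current_seq p.2 p.1) s)
    (0, none, none)
  (s.2.1, s.2.2, s.1)

-- the while-loop; fuel = seqs.length is enough: every iteration marks a fresh index used
def aLoop (seqs : List String) : Nat → String → PySem.Set Int → String
  | 0, reconstructed, _ => reconstructed
  | fuel+1, reconstructed, used =>
    match find_best_overlap reconstructed seqs used with
    | (none, _, _) => reconstructed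
    | (some _, none, _) => reconstructed   -- unreachable: best_fragment/best_index are assigned together
    | (some f, some i, ov) =>
      if ov < 10 then reconstructed
      else aLoop seqs fuel (reconstructed ++ PySem.Str.slice f (some ov) none) (PySem.Set.add used i)

def assemble_fragments (seqs : List String) : String :=
  match PySem.List.pyGet? seqs 0 with
  | none => ""   -- Python raises IndexError here; excluded by Pre_
  | some s0 => aLoop seqs seqs.length s0 (PySem.Set.add PySem.Set.empty 0)

-- ===== PORT B =====
-- index.setdefault(key, []).append(v)  ≡  d[key] = d.get(key, []) + [v]  = Dict.modify
def buildIndex (seqs : List String) : PySem.Dict String (List (Int × Int)) :=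
  (PySem.List.enumerate seqs 0).foldl
    (fun d p =>
      ((PySem.List.pyRange 11 (min 100 (PySem.Str.len p.2)) 1).foldl
        (fun d j => d.modify (PySem.Str.slice p.2 none (some j)) [] (· ++ [(j, p.1)])) d).modify
        (PySem.Str.slice p.2 none (some 100)) [] (· ++ [(100, p.1)]))
    PySem.Dict.empty

-- body of 'if i not in used and (best is None or j > best[0] or (j == best[0] and i < best[1]))'
def bUpd (used : PySem.Set Int) : Option (Int × Int) → (Int × Int) → Option (Int × Int) :=
  fun best e =>
    match best with
    | none => if PySem.Set.contains used e.2 then none else some e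
    | some (bj, bi) =>
      if !(PySem.Set.contains used e.2) && (decide (bj < e.1) || (e.1 == bj && decide (e.2 < bi)))
      then some e else some (bj, bi)

-- one round: probe the suffixes rec[n-k:] for k = 0 .. min(100, n)
def bStep (index : PySem.Dict String (List (Int × Int))) (rec : String)
    (used : PySem.Set Int) : Option (Int × Int) :=
  (PySem.List.pyRange 0 (min 100 (PySem.Str.len rec) + 1) 1).foldl
    (fun best k =>
      (index.getD (PySem.Str.slice rec (some (PySem.Str.len rec - k)) none) []).foldl
        (bUpd used) best)
    none

def bLoop (seqs : List String) (index : PySem.Dict String (List (Int × Int))) :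
    Nat → String → PySem.Set Int → String
  | 0, reconstructed, _ => reconstructed
  | fuel+1, reconstructed, used =>
    match bStep index reconstructed used with
    | none => reconstructed
    | some (j, i) =>
      -- i came from enumerate(seqs), so seqs[i] never raises: pyGetD is exact here
      bLoop seqs index fuel
        (reconstructed ++ PySem.Str.slice (PySem.List.pyGetD seqs i "") (some j) none)
        (PySem.Set.add used i)

def assemble_fragments_alt (seqs : List String) : String :=
  match PySem.List.pyGet? seqs 0 with
  | none => ""   -- seqs[0] raises on the empty list; excluded by Pre_
  | some s0 => bLoop seqs (buildIndex seqs) seqs.length s0 (PySem.Set.add PySem.Set.empty 0)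

-- ===== PRECONDITION & SPEC =====
-- Pre_ excludes only the empty list, on which Python's seqs[0] raises IndexError (in B too).
def Pre_assemble_fragments (seqs : List String) : Prop := seqs ≠ []
instance (seqs : List String) : Decidable (Pre_assemble_fragments seqs) := by
  unfold Pre_assemble_fragments; infer_instance

def pvWitness_assemble_fragments : List String := ["ACGTACGTACGT"]

def Spec_assemble_fragments (seqs : List String) (out : String) : Prop :=
  out = assemble_fragments_alt seqs
instance (seqs : List String) (out : String) : Decidable (Spec_assemble_fragments seqs out) := by
  unfold Spec_assemble_fragments; infer_instance

-- ===== CLAIM (what is proved, stated in full; the proofs are below) =====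
def Claim_equal_assemble_fragments : Prop :=
  ∀ (seqs : List String), Dom_assemble_fragments seqs → Pre_assemble_fragments seqs →
    Spec_assemble_fragments seqs (assemble_fragments seqs)

-- ===== LEMMAS AND PROOFS =====

-- ---- A-side machinery: find_best_overlap as a j-major maximal search ----

def L100 : List Int := PySem.List.pyRange 100 10 (-1)

lemma L100_pairwise : L100.Pairwise (· > ·) := by decide

lemma L100_eq_reverse : L100 = (PySem.List.pyRange 11 101 1).reverse := by decide

lemma mem_L100 (j : Int) : j ∈ L100 ↔ 11 ≤ j ∧ j ≤ 100 := by
  rw [L100_eq_reverse, List.mem_reverse, PySem.List.mem_pyRange_one]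
  omega

-- the per-fragment step of A's outer loop (definitionally the lambda in find_best_overlap)
def Fstep (current_seq : String) (used : PySem.Set Int) :
    (Int × Option String × Option Int) → (Int × String) → (Int × Option String × Option Int) :=
  fun s p =>
    if PySem.Set.contains used p.1 then s
    else L100.foldl (fboInner current_seq p.2 p.1) s

-- the per-(pair,j) match predicate
def qp (rec : String) (used : PySem.Set Int) (p : Int × String) (j : Int) : Bool :=
  !(PySem.Set.contains used p.1) && PySem.Str.endswith rec (PySem.Str.slice p.2 none (some j))

-- j-major reformulation of A's search (largest overlap first, first fragment at it)
def jSearch (rec : String) (seqs : List String) (used : PySem.Set Int) :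
    Option (Int × String × Int) :=
  L100.findSome? (fun j =>
    ((PySem.List.enumerate seqs 0).find? (fun p => qp rec used p j)).map
      (fun p => (p.1, p.2, j)))

-- B's search restricted to overlaps strictly above bo
def searchGt (rec : String) (used : PySem.Set Int) (ps : List (Int × String)) (bo : Int) :
    Option (Int × String × Int) :=
  L100.findSome? (fun j =>
    if bo < j then (ps.find? (fun p => qp rec used p j)).map (fun p => (p.1, p.2, j)) else none)

lemma findSome?_congr_mem {α β : Type} (l : List α) (f g : α → Option β)
    (h : ∀ a ∈ l, f a = g a) : l.findSome? f = l.findSome? g := by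
  induction l with
  | nil => rfl
  | cons x xs ih =>
    rw [List.findSome?_cons, List.findSome?_cons, h x (List.mem_cons_self ..)]
    cases g x with
    | none => exact ih (fun a ha => h a (List.mem_cons_of_mem _ ha))
    | some b => rfl

lemma foldl_noup (rec frag : String) (i : Int) (l : List Int)
    (s : Int × Option String × Option Int) (h : ∀ j ∈ l, j ≤ s.1) :
    l.foldl (fboInner rec frag i) s = s := by
  induction l with
  | nil => rfl
  | cons j l ih =>
    have hj : j ≤ s.1 := h j (List.mem_cons_self ..)
    have : fboInner rec frag i s j = s := by
      unfold fboInner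
      split_ifs with h1 h2
      · omega
      · rfl
      · rfl
    rw [List.foldl_cons, this]
    exact ih (fun x hx => h x (List.mem_cons_of_mem _ hx))

lemma innerA (rec frag : String) (i : Int) (l : List Int) (hl : l.Pairwise (· > ·))
    (s : Int × Option String × Option Int) :
    l.foldl (fboInner rec frag i) s =
      match l.find? (fun j => PySem.Str.endswith rec (PySem.Str.slice frag none (some j))) with
      | none => s
      | some j => if s.1 < j then (j, some frag, some i) else s := by
  induction l with
  | nil => rfl
  | cons j l ih =>
    rw [List.pairwise_cons] at hl
    obtain ⟨hgt, htl⟩ := hl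
    rw [List.foldl_cons, List.find?_cons]
    by_cases hm : PySem.Str.endswith rec (PySem.Str.slice frag none (some j)) = true
    · rw [hm]
      by_cases hlt : s.1 < j
      · have hs : fboInner rec frag i s j = (j, some frag, some i) := by
          unfold fboInner; rw [if_pos hm, if_pos hlt]
        rw [hs, foldl_noup _ _ _ _ _ (fun x hx => le_of_lt (hgt x hx))]
        simp [hlt]
      · have hs : fboInner rec frag i s j = s := by
          unfold fboInner; rw [if_pos hm, if_neg hlt]
        rw [hs, foldl_noup _ _ _ _ _ (fun x hx => by have := hgt x hx; omega)]
        simp [hlt]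
    · rw [Bool.not_eq_true] at hm
      rw [hm]
      have hs : fboInner rec frag i s j = s := by
        unfold fboInner; rw [hm]; exact if_neg (by simp)
      rw [hs]
      exact ih htl

lemma stepA (rec : String) (used : PySem.Set Int) (s : Int × Option String × Option Int)
    (p : Int × String) :
    Fstep rec used s p =
      match L100.find? (fun j => qp rec used p j) with
      | none => s
      | some j => if s.1 < j then (j, some p.2, some p.1) else s := by
  unfold Fstep
  by_cases hc : PySem.Set.contains used p.1 = true
  · rw [if_pos hc]
    have : L100.find? (fun j => qp rec used p j) = none := by
      rw [List.find?_eq_none]; intro x _; unfold qp; rw [hc]; simp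
    rw [this]
  · rw [Bool.not_eq_true] at hc
    rw [if_neg (by rw [hc]; simp)]
    have hq : (fun j => qp rec used p j) =
        (fun j => PySem.Str.endswith rec (PySem.Str.slice p.2 none (some j))) := by
      funext j; unfold qp; rw [hc]; simp
    rw [hq]
    exact innerA rec p.2 p.1 L100 L100_pairwise s

lemma find?_pairwise_gt (l : List Int) (hl : l.Pairwise (· > ·)) (pfn : Int → Bool) (j0 : Int)
    (h : l.find? pfn = some j0) : ∀ j ∈ l, j0 < j → pfn j = false := by
  induction l with
  | nil => simp at h
  | cons x xs ih =>
    rw [List.pairwise_cons] at hl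
    obtain ⟨hgt, htl⟩ := hl
    rw [List.find?_cons] at h
    by_cases hx : pfn x = true
    · rw [hx] at h
      simp only [Option.some.injEq] at h
      subst h
      intro j hj hlt
      rcases List.mem_cons.mp hj with h1 | h1
      · omega
      · have := hgt j h1; omega
    · rw [Bool.not_eq_true] at hx
      rw [hx] at h
      intro j hj hlt
      rcases List.mem_cons.mp hj with h1 | h1
      · subst h1; exact hx
      · exact ih htl h j h1 hlt

lemma search_cons (rec : String) (used : PySem.Set Int) (p : Int × String)
    (ps : List (Int × String)) :
    ∀ (l : List Int), l.Pairwise (· > ·) → ∀ (bo j0 : Int),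
      l.find? (fun j => qp rec used p j) = some j0 → bo < j0 →
      l.findSome? (fun j =>
        if bo < j then ((p::ps).find? (fun q => qp rec used q j)).map (fun q => (q.1, q.2, j))
        else none)
      = match l.findSome? (fun j =>
          if j0 < j then (ps.find? (fun q => qp rec used q j)).map (fun q => (q.1, q.2, j))
          else none) with
        | none => some (p.1, p.2, j0)
        | some t => some t := by
  intro l
  induction l with
  | nil => intro _ bo j0 h; simp at h
  | cons x xs ih =>
    intro hl bo j0 hfind hbo
    rw [List.pairwise_cons] at hl
    obtain ⟨hgt, htl⟩ := hl
    rw [List.find?_cons] at hfind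
    by_cases hqx : qp rec used p x = true
    · rw [hqx] at hfind
      simp only [Option.some.injEq] at hfind
      subst hfind
      rw [List.findSome?_cons, List.findSome?_cons]
      have h1 : (if bo < x then ((p::ps).find? (fun q => qp rec used q x)).map (fun q => (q.1, q.2, x)) else none)
          = some (p.1, p.2, x) := by
        rw [if_pos hbo, List.find?_cons, hqx]; rfl
      have h2 : (if x < x then (ps.find? (fun q => qp rec used q x)).map (fun q => (q.1, q.2, x)) else none)
          = (none : Option (Int × String × Int)) := by
        rw [if_neg (by omega)]
      rw [h1, h2]
      have h3 : xs.findSome? (fun j =>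
          if x < j then (ps.find? (fun q => qp rec used q j)).map (fun q => (q.1, q.2, j))
          else none) = none := by
        rw [List.findSome?_eq_none_iff]
        intro j hj
        rw [if_neg (by have := hgt j hj; omega)]
      rw [h3]
    · rw [Bool.not_eq_true] at hqx
      rw [hqx] at hfind
      have hj0 : j0 ∈ xs := List.mem_of_find?_eq_some hfind
      have hxj0 : j0 < x := hgt j0 hj0
      rw [List.findSome?_cons, List.findSome?_cons]
      have heads : (if bo < x then ((p::ps).find? (fun q => qp rec used q x)).map (fun q => (q.1, q.2, x)) else none)
          = (if j0 < x then (ps.find? (fun q => qp rec used q x)).map (fun q => (q.1, q.2, x)) else none) := by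
        rw [if_pos (by omega), if_pos hxj0, List.find?_cons, hqx]
      rw [heads]
      cases hv : (if j0 < x then (ps.find? (fun q => qp rec used q x)).map (fun q => (q.1, q.2, x)) else none) with
      | some v => rfl
      | none => exact ih htl bo j0 hfind hbo

lemma foldA_eq (rec : String) (used : PySem.Set Int) :
    ∀ (ps : List (Int × String)) (s : Int × Option String × Option Int),
      ps.foldl (Fstep rec used) s =
        match searchGt rec used ps s.1 with
        | none => s
        | some (i, f, j) => (j, some f, some i) := by
  intro ps
  induction ps with
  | nil =>
    intro s
    have : searchGt rec used [] s.1 = none := by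
      unfold searchGt
      rw [List.findSome?_eq_none_iff]
      intro j _
      simp
    rw [List.foldl_nil, this]
  | cons p ps ih =>
    intro s
    rw [List.foldl_cons, stepA]
    cases hfind : L100.find? (fun j => qp rec used p j) with
    | none =>
      have hq : ∀ j ∈ L100, qp rec used p j = false := by
        intro j hj
        have := List.find?_eq_none.mp hfind j hj
        simpa using this
      have hsg : searchGt rec used (p::ps) s.1 = searchGt rec used ps s.1 := by
        unfold searchGt
        apply findSome?_congr_mem
        intro j hj
        by_cases hb : s.1 < j
        · rw [if_pos hb, if_pos hb, List.find?_cons, hq j hj]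
        · rw [if_neg hb, if_neg hb]
      rw [hsg]
      exact ih s
    | some j0 =>
      have hred : (match some j0 with
          | none => s
          | some j => if s.1 < j then (j, some p.2, some p.1) else s)
          = if s.1 < j0 then (j0, some p.2, some p.1) else s := rfl
      rw [hred]
      by_cases hlt : s.1 < j0
      · rw [if_pos hlt, ih]
        have hsc := search_cons rec used p ps L100 L100_pairwise s.1 j0 hfind hlt
        have hcons : searchGt rec used (p::ps) s.1
            = match searchGt rec used ps j0 with
              | none => some (p.1, p.2, j0)
              | some t => some t := by
          unfold searchGt
          exact hsc
        rw [hcons]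
        cases searchGt rec used ps j0 with
        | none => rfl
        | some t => rfl
      · rw [if_neg hlt, ih]
        have hbefore : ∀ j ∈ L100, j0 < j → qp rec used p j = false :=
          find?_pairwise_gt L100 L100_pairwise _ j0 hfind
        have hsg : searchGt rec used (p::ps) s.1 = searchGt rec used ps s.1 := by
          unfold searchGt
          apply findSome?_congr_mem
          intro j hj
          by_cases hb : s.1 < j
          · rw [if_pos hb, if_pos hb, List.find?_cons, hbefore j hj (by omega)]
          · rw [if_neg hb, if_neg hb]
        rw [hsg]

lemma fbo_eq (rec : String) (seqs : List String) (used : PySem.Set Int) :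
    find_best_overlap rec seqs used =
      match jSearch rec seqs used with
      | none => (none, none, 0)
      | some (i, f, j) => (some f, some i, j) := by
  have hport : find_best_overlap rec seqs used =
      (let s := (PySem.List.enumerate seqs 0).foldl (Fstep rec used) (0, none, none)
       (s.2.1, s.2.2, s.1)) := rfl
  have hbs : searchGt rec used (PySem.List.enumerate seqs 0) 0 = jSearch rec seqs used := by
    unfold searchGt jSearch
    apply findSome?_congr_mem
    intro j hj
    rw [if_pos (by have := (mem_L100 j).mp hj; omega)]
  rw [hport]
  simp only [foldA_eq, hbs]
  cases hb : jSearch rec seqs used with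
  | none => rfl
  | some t => obtain ⟨i, f, j⟩ := t; rfl


-- characterization of jSearch

lemma findSome?_pairwise_gt {β : Type} (l : List Int) (hl : l.Pairwise (· > ·))
    (f : Int → Option β) (b : β) (h : l.findSome? f = some b) :
    ∃ j ∈ l, f j = some b ∧ ∀ j' ∈ l, j < j' → f j' = none := by
  induction l with
  | nil => simp at h
  | cons x xs ih =>
    rw [List.pairwise_cons] at hl
    obtain ⟨hgt, htl⟩ := hl
    rw [List.findSome?_cons] at h
    cases hx : f x with
    | some v =>
      simp only [hx] at h
      refine ⟨x, List.mem_cons_self .., by rw [hx, h], ?_⟩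
      intro j' hj' hlt
      rcases List.mem_cons.mp hj' with h1 | h1
      · omega
      · have := hgt j' h1; omega
    | none =>
      rw [hx] at h
      obtain ⟨j, hj, hfj, hmax⟩ := ih htl h
      refine ⟨j, List.mem_cons_of_mem _ hj, hfj, ?_⟩
      intro j' hj' hlt
      rcases List.mem_cons.mp hj' with h1 | h1
      · subst h1; exact hx
      · exact hmax j' h1 hlt

lemma find?_first {α : Type} (R : α → α → Prop) (l : List α) (hl : l.Pairwise R)
    (pfn : α → Bool) (a : α) (h : l.find? pfn = some a) :
    ∀ x ∈ l, pfn x = true → x = a ∨ R a x := by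
  induction l with
  | nil => simp at h
  | cons y ys ih =>
    rw [List.pairwise_cons] at hl
    obtain ⟨hR, htl⟩ := hl
    rw [List.find?_cons] at h
    by_cases hy : pfn y = true
    · rw [hy] at h
      simp only [Option.some.injEq] at h
      subst h
      intro x hx _
      rcases List.mem_cons.mp hx with h1 | h1
      · exact Or.inl h1
      · exact Or.inr (hR x h1)
    · rw [Bool.not_eq_true] at hy
      rw [hy] at h
      intro x hx hpx
      rcases List.mem_cons.mp hx with h1 | h1
      · subst h1; rw [hy] at hpx; exact absurd hpx (by simp)
      · exact ih htl h x h1 hpx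

lemma jSearch_none_iff (rec : String) (seqs : List String) (used : PySem.Set Int) :
    jSearch rec seqs used = none ↔
      ∀ j ∈ L100, ∀ p ∈ PySem.List.enumerate seqs 0, qp rec used p j = false := by
  unfold jSearch
  rw [List.findSome?_eq_none_iff]
  constructor
  · intro h j hj p hp
    have := h j hj
    rw [Option.map_eq_none_iff] at this
    simpa using List.find?_eq_none.mp this p hp
  · intro h j hj
    rw [Option.map_eq_none_iff, List.find?_eq_none]
    intro p hp
    simp [h j hj p hp]

lemma jSearch_some (rec : String) (seqs : List String) (used : PySem.Set Int)
    (i : Int) (f : String) (j : Int) (h : jSearch rec seqs used = some (i, f, j)) :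
    j ∈ L100 ∧ (i, f) ∈ PySem.List.enumerate seqs 0 ∧ qp rec used (i, f) j = true ∧
    (∀ j' ∈ L100, j < j' → ∀ p ∈ PySem.List.enumerate seqs 0, qp rec used p j' = false) ∧
    (∀ p ∈ PySem.List.enumerate seqs 0, qp rec used p j = true → i ≤ p.1) := by
  unfold jSearch at h
  obtain ⟨j0, hj0, hfj0, hmax⟩ := findSome?_pairwise_gt L100 L100_pairwise _ _ h
  rw [Option.map_eq_some_iff] at hfj0
  obtain ⟨p0, hfind, hpeq⟩ := hfj0
  obtain ⟨p1, p2⟩ := p0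
  simp only [Prod.mk.injEq] at hpeq
  obtain ⟨rfl, rfl, rfl⟩ := hpeq
  refine ⟨hj0, List.mem_of_find?_eq_some hfind, by simpa using List.find?_some hfind, ?_, ?_⟩
  · intro j' hj' hlt p hp
    have := hmax j' hj' hlt
    rw [Option.map_eq_none_iff] at this
    simpa using List.find?_eq_none.mp this p hp
  · intro p hp hqp
    have := find?_first (fun a b => a.1 < b.1) (PySem.List.enumerate seqs 0)
      (PySem.List.pairwise_lt_enumerate ..) _ _ hfind p hp hqp
    rcases this with h1 | h1
    · rw [h1]
    · exact le_of_lt h1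


-- ---- B-side machinery: the prefix index as a filtered entry list ----

def entriesOf (seqs : List String) : List (String × (Int × Int)) :=
  (PySem.List.enumerate seqs 0).flatMap (fun p =>
    (PySem.List.pyRange 11 (min 100 (PySem.Str.len p.2)) 1).map
      (fun j => (PySem.Str.slice p.2 none (some j), (j, p.1)))
    ++ [(PySem.Str.slice p.2 none (some 100), (100, p.1))])

lemma buildIndex_eq (seqs : List String) :
    buildIndex seqs =
      (entriesOf seqs).foldl (fun d q => d.modify q.1 [] (· ++ [q.2])) PySem.Dict.empty := by
  unfold buildIndex entriesOf
  rw [List.foldl_flatMap]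
  apply PySem.List.foldl_congr_mem
  intro acc p _
  rw [List.foldl_append, List.foldl_map]
  simp

lemma index_getD (seqs : List String) (s : String) :
    (buildIndex seqs).getD s [] =
      ((entriesOf seqs).filter (fun q => q.1 == s)).map (·.2) := by
  rw [buildIndex_eq]
  have h := PySem.Dict.getD_foldl_modify_append (l := entriesOf seqs)
    (d := PySem.Dict.empty) (c := s)
  simpa [PySem.Dict.getD_empty] using h

lemma mem_entriesOf (seqs : List String) (q : String × (Int × Int)) :
    q ∈ entriesOf seqs ↔
      ∃ p ∈ PySem.List.enumerate seqs 0,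
        (∃ j : Int, 11 ≤ j ∧ j < min 100 (PySem.Str.len p.2) ∧
            q = (PySem.Str.slice p.2 none (some j), (j, p.1))) ∨
        q = (PySem.Str.slice p.2 none (some 100), (100, p.1)) := by
  unfold entriesOf
  simp only [List.mem_flatMap, List.mem_append, List.mem_map, List.mem_singleton,
    PySem.List.mem_pyRange_one]
  constructor
  · rintro ⟨p, hp, h⟩
    refine ⟨p, hp, ?_⟩
    rcases h with ⟨j, ⟨hj1, hj2⟩, rfl⟩ | rfl
    · exact Or.inl ⟨j, hj1, hj2, rfl⟩
    · exact Or.inr rfl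
  · rintro ⟨p, hp, h⟩
    refine ⟨p, hp, ?_⟩
    rcases h with ⟨j, hj1, hj2, rfl⟩ | rfl
    · exact Or.inl ⟨j, ⟨hj1, hj2⟩, rfl⟩
    · exact Or.inr rfl

lemma toList_slice_to (s : String) (j : Int) (h : 0 ≤ j) :
    (PySem.Str.slice s none (some j)).toList = s.toList.take j.toNat := by
  have h2 : (PySem.Str.slice s none (some j)).toList = PySem.List.slice s.toList none (some j) := by
    simp
  rw [h2, show (j : Int) = ((j.toNat : Nat) : Int) by omega, PySem.List.slice_to_natCast]
  simp
  omega

lemma endswith_iff_suffix (s p : String) :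
    PySem.Str.endswith s p = true ↔ p.toList <:+ s.toList := by
  simp [PySem.Chars.endswith_iff]

lemma toList_slice_from_sub (rec : String) (k : Int) (h0 : 0 ≤ k)
    (h1 : k ≤ PySem.Str.len rec) :
    (PySem.Str.slice rec (some (PySem.Str.len rec - k)) none).toList
      = rec.toList.drop (rec.toList.length - k.toNat) := by
  have hlen : PySem.Str.len rec = (rec.toList.length : Int) := by
    simp [PySem.Str.len_eq]
  have he : PySem.Str.len rec - k = (((rec.toList.length - k.toNat : Nat) : Nat) : Int) := by
    rw [hlen] at h1 ⊢
    omega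
  rw [he]
  simp [PySem.List.slice_from_natCast]


-- candidates scanned by one round of B, and their semantic description

def Lcat (seqs : List String) (rec : String) : List (Int × Int) :=
  (PySem.List.pyRange 0 (min 100 (PySem.Str.len rec) + 1) 1).flatMap
    (fun k => (buildIndex seqs).getD
      (PySem.Str.slice rec (some (PySem.Str.len rec - k)) none) [])

def CandP (rec : String) (seqs : List String) (e : Int × Int) : Prop :=
  ∃ p ∈ PySem.List.enumerate seqs 0, e.2 = p.1 ∧
    ((11 ≤ e.1 ∧ e.1 < min 100 (PySem.Str.len p.2) ∧
        PySem.Str.endswith rec (PySem.Str.slice p.2 none (some e.1)) = true) ∨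
     (e.1 = 100 ∧ PySem.Str.endswith rec (PySem.Str.slice p.2 none (some 100)) = true))

lemma len_nonneg (s : String) : 0 ≤ PySem.Str.len s := by
  simp [PySem.Str.len_eq]

lemma endswith_probe (rec : String) (k : Int) (h0 : 0 ≤ k) (h1 : k ≤ PySem.Str.len rec) :
    PySem.Str.endswith rec (PySem.Str.slice rec (some (PySem.Str.len rec - k)) none) = true := by
  rw [endswith_iff_suffix, toList_slice_from_sub rec k h0 h1]
  exact List.drop_suffix _ _

lemma mem_Lcat_iff (seqs : List String) (rec : String) (e : Int × Int) :
    e ∈ Lcat seqs rec ↔ CandP rec seqs e := by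
  unfold Lcat
  simp only [List.mem_flatMap, PySem.List.mem_pyRange_one]
  constructor
  · rintro ⟨k, ⟨hk0, hk1⟩, hmem⟩
    rw [index_getD, List.mem_map] at hmem
    obtain ⟨q, hq, rfl⟩ := hmem
    rw [List.mem_filter] at hq
    obtain ⟨hqm, hqk⟩ := hq
    have hkey : q.1 = PySem.Str.slice rec (some (PySem.Str.len rec - k)) none := by
      exact eq_of_beq hqk
    have hk1' : k ≤ PySem.Str.len rec := by
      have := len_nonneg rec; omega
    have hsfx : PySem.Str.endswith rec q.1 = true := by
      rw [hkey]; exact endswith_probe rec k hk0 hk1'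
    rw [mem_entriesOf] at hqm
    obtain ⟨p, hp, hcase⟩ := hqm
    rcases hcase with ⟨j, hj1, hj2, rfl⟩ | rfl
    · exact ⟨p, hp, rfl, Or.inl ⟨hj1, hj2, hsfx⟩⟩
    · exact ⟨p, hp, rfl, Or.inr ⟨rfl, hsfx⟩⟩
  · rintro ⟨p, hp, he2, hcase⟩
    -- the key string for e
    have hkey : ∃ key : String, (key, e) ∈ entriesOf seqs ∧
        PySem.Str.endswith rec key = true ∧ (key.toList.length ≤ 100) := by
      rcases hcase with ⟨hj1, hj2, hend⟩ | ⟨h100, hend⟩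
      · refine ⟨PySem.Str.slice p.2 none (some e.1), ?_, hend, ?_⟩
        · rw [mem_entriesOf]
          refine ⟨p, hp, Or.inl ⟨e.1, hj1, hj2, ?_⟩⟩
          rw [← he2]
        · rw [toList_slice_to _ _ (by omega)]
          have := List.length_take_le e.1.toNat p.2.toList
          omega
      · refine ⟨PySem.Str.slice p.2 none (some 100), ?_, hend, ?_⟩
        · rw [mem_entriesOf]
          refine ⟨p, hp, Or.inr ?_⟩
          rw [← he2, ← h100]
        · rw [toList_slice_to _ _ (by norm_num)]
          have := List.length_take_le (Int.toNat 100) p.2.toList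
          omega
    obtain ⟨key, hkmem, hkend, hklen⟩ := hkey
    have hsuff : key.toList <:+ rec.toList := (endswith_iff_suffix _ _).mp hkend
    have hklerec : key.toList.length ≤ rec.toList.length := List.IsSuffix.length_le hsuff
    refine ⟨(key.toList.length : Int), ?_, ?_⟩
    · constructor
      · omega
      · have : PySem.Str.len rec = (rec.toList.length : Int) := by simp [PySem.Str.len_eq]
        rw [this]
        omega
    · rw [index_getD, List.mem_map]
      refine ⟨(key, e), ?_, rfl⟩
      rw [List.mem_filter]
      refine ⟨hkmem, ?_⟩
      have h2 : PySem.Str.len rec = (rec.toList.length : Int) := by simp [PySem.Str.len_eq]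
      have h3 : ((key.toList.length : Int)) ≤ PySem.Str.len rec := by
        rw [h2]; exact_mod_cast hklerec
      have h4 := toList_slice_from_sub rec (key.toList.length : Int) (by omega) h3
      have hkeyeq : key = PySem.Str.slice rec (some (PySem.Str.len rec - (key.toList.length : Int))) none := by
        apply String.toList_inj.mp
        rw [h4]
        have h5 := List.suffix_iff_eq_drop.mp hsuff
        simpa using h5
      rw [← hkeyeq]
      simp

lemma bStep_eq (seqs : List String) (rec : String) (used : PySem.Set Int) :
    bStep (buildIndex seqs) rec used = (Lcat seqs rec).foldl (bUpd used) none := by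
  unfold bStep Lcat
  rw [List.foldl_flatMap]


-- ---- the selection fold ----

def okU (used : PySem.Set Int) (e : Int × Int) : Bool := !(PySem.Set.contains used e.2)

def lexGT (e f : Int × Int) : Prop := f.1 < e.1 ∨ (e.1 = f.1 ∧ e.2 < f.2)

lemma not_lexGT_refl (e : Int × Int) : ¬ lexGT e e := by
  obtain ⟨a, b⟩ := e; unfold lexGT; simp

lemma not_lexGT_trans (a b c : Int × Int) (h1 : ¬ lexGT a b) (h2 : ¬ lexGT b c) :
    ¬ lexGT a c := by
  obtain ⟨a1, a2⟩ := a; obtain ⟨b1, b2⟩ := b; obtain ⟨c1, c2⟩ := c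
  unfold lexGT at *
  simp only [not_or, not_and, not_lt] at *
  omega

lemma bUpd_shape (used : PySem.Set Int) (b : Option (Int × Int)) (x : Int × Int) :
    bUpd used b x = b ∨ (bUpd used b x = some x ∧ okU used x = true) := by
  unfold bUpd okU
  cases b with
  | none =>
    cases hc : PySem.Set.contains used x.2
    · exact Or.inr ⟨by simp, by simp⟩
    · exact Or.inl (by simp)
  | some e =>
    obtain ⟨bj, bi⟩ := e
    cases hc : PySem.Set.contains used x.2
    · cases hcond : (decide (bj < x.1) || (x.1 == bj && decide (x.2 < bi)))
      · exact Or.inl (by simp [hcond])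
      · exact Or.inr ⟨by simp [hcond], by simp⟩
    · exact Or.inl (by simp)

lemma bUpd_dom_x (used : PySem.Set Int) (b : Option (Int × Int)) (x : Int × Int)
    (hx : okU used x = true) : ∃ e, bUpd used b x = some e ∧ ¬ lexGT x e := by
  unfold okU at hx
  rw [Bool.not_eq_true'] at hx
  unfold bUpd
  cases b with
  | none =>
    rw [hx]
    exact ⟨x, by simp, not_lexGT_refl x⟩
  | some e =>
    obtain ⟨bj, bi⟩ := e
    rw [hx]
    cases hcond : (decide (bj < x.1) || (x.1 == bj && decide (x.2 < bi)))
    · refine ⟨(bj, bi), by simp [hcond], ?_⟩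
      simp only [Bool.or_eq_false_iff, decide_eq_false_iff_not, Bool.and_eq_false_iff,
        beq_eq_false_iff_ne, ne_eq] at hcond
      obtain ⟨x1, x2⟩ := x
      unfold lexGT
      simp only [not_or, not_and, not_lt] at *
      obtain ⟨h1, h2⟩ := hcond
      constructor
      · omega
      · intro he
        rcases h2 with h2 | h2
        · exact absurd he h2
        · omega
    · exact ⟨x, by simp [hcond], not_lexGT_refl x⟩

lemma bUpd_dom_b (used : PySem.Set Int) (b : Option (Int × Int)) (x : Int × Int)
    (e' : Int × Int) (hb : b = some e') : ∃ e, bUpd used b x = some e ∧ ¬ lexGT e' e := by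
  subst hb
  unfold bUpd
  obtain ⟨bj, bi⟩ := e'
  cases hc : PySem.Set.contains used x.2
  · cases hcond : (decide (bj < x.1) || (x.1 == bj && decide (x.2 < bi)))
    · exact ⟨(bj, bi), by simp [hcond], not_lexGT_refl _⟩
    · refine ⟨x, by simp [hcond], ?_⟩
      simp only [Bool.or_eq_true, decide_eq_true_eq, Bool.and_eq_true, beq_iff_eq] at hcond
      obtain ⟨x1, x2⟩ := x
      unfold lexGT
      simp only [not_or, not_and, not_lt]
      constructor
      · omega
      · intro he; omega
  · exact ⟨(bj, bi), by simp, not_lexGT_refl _⟩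

lemma foldUpd_spec (used : PySem.Set Int) :
    ∀ (l : List (Int × Int)) (b : Option (Int × Int)),
      (l.foldl (bUpd used) b = b ∨
        ∃ e ∈ l, l.foldl (bUpd used) b = some e ∧ okU used e = true) ∧
      (∀ e' ∈ l, okU used e' = true →
        ∃ e, l.foldl (bUpd used) b = some e ∧ ¬ lexGT e' e) ∧
      (∀ e', b = some e' → ∃ e, l.foldl (bUpd used) b = some e ∧ ¬ lexGT e' e) := by
  intro l
  induction l with
  | nil =>
    intro b
    refine ⟨Or.inl rfl, by simp, ?_⟩
    intro e' hb
    exact ⟨e', by simpa using hb, not_lexGT_refl e'⟩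
  | cons x l ih =>
    intro b
    rw [List.foldl_cons]
    obtain ⟨ih1, ih2, ih3⟩ := ih (bUpd used b x)
    refine ⟨?_, ?_, ?_⟩
    · rcases ih1 with h | ⟨e, he, hfold, hok⟩
      · rcases bUpd_shape used b x with h2 | ⟨h2, hok⟩
        · exact Or.inl (by rw [h, h2])
        · exact Or.inr ⟨x, List.mem_cons_self .., by rw [h, h2], hok⟩
      · exact Or.inr ⟨e, List.mem_cons_of_mem _ he, hfold, hok⟩
    · intro e' hmem hok
      rcases List.mem_cons.mp hmem with rfl | hmem'
      · obtain ⟨e0, he0, hd⟩ := bUpd_dom_x used b e' hok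
        obtain ⟨e1, he1, hd1⟩ := ih3 e0 he0
        exact ⟨e1, he1, not_lexGT_trans _ _ _ hd hd1⟩
      · exact ih2 e' hmem' hok
    · intro e' hb
      obtain ⟨e0, he0, hd⟩ := bUpd_dom_b used b x e' hb
      obtain ⟨e1, he1, hd1⟩ := ih3 e0 he0
      exact ⟨e1, he1, not_lexGT_trans _ _ _ hd hd1⟩


-- ---- bridging the two candidate descriptions ----

lemma cand_to_qp (rec : String) (seqs : List String) (e : Int × Int)
    (h : CandP rec seqs e) :
    ∃ p ∈ PySem.List.enumerate seqs 0, p.1 = e.2 ∧ 11 ≤ e.1 ∧ e.1 ≤ 100 ∧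
      PySem.Str.endswith rec (PySem.Str.slice p.2 none (some e.1)) = true := by
  obtain ⟨p, hp, he2, hcase⟩ := h
  rcases hcase with ⟨h1, h2, h3⟩ | ⟨h1, h2⟩
  · exact ⟨p, hp, he2.symm, h1, by omega, h3⟩
  · refine ⟨p, hp, he2.symm, by omega, by omega, ?_⟩
    rw [h1]
    exact h2

lemma qpmax_to_cand (rec : String) (seqs : List String) (p : Int × String) (j : Int)
    (hp : p ∈ PySem.List.enumerate seqs 0) (hj1 : 11 ≤ j) (hj2 : j ≤ 100)
    (hend : PySem.Str.endswith rec (PySem.Str.slice p.2 none (some j)) = true)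
    (hnot : j = 100 ∨ PySem.Str.endswith rec (PySem.Str.slice p.2 none (some 100)) = false) :
    CandP rec seqs (j, p.1) := by
  rcases hnot with h100 | hn100
  · subst h100
    exact ⟨p, hp, rfl, Or.inr ⟨rfl, hend⟩⟩
  · have hlen2 : PySem.Str.len p.2 = ((p.2.toList.length : Nat) : Int) := by
      simp [PySem.Str.len_eq]
    have hj100 : j < 100 := by
      rcases lt_or_eq_of_le hj2 with h | h
      · exact h
      · rw [h] at hend; rw [hend] at hn100; exact absurd hn100 (by simp)
    have hlt : j < PySem.Str.len p.2 := by
      by_contra hle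
      rw [not_lt] at hle
      have hkeyeq : PySem.Str.slice p.2 none (some j) = PySem.Str.slice p.2 none (some 100) := by
        apply String.toList_inj.mp
        rw [toList_slice_to _ _ (by omega), toList_slice_to _ _ (by norm_num)]
        rw [List.take_of_length_le (by rw [hlen2] at hle; omega),
          List.take_of_length_le (by rw [hlen2] at hle; omega)]
      rw [hkeyeq, hn100] at hend
      exact absurd hend (by simp)
    exact ⟨p, hp, rfl, Or.inl ⟨hj1, by omega, hend⟩⟩

-- ---- per-round agreement and the loop ----

lemma step_match (seqs : List String) (rec : String) (used : PySem.Set Int) :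
    bStep (buildIndex seqs) rec used =
      match jSearch rec seqs used with
      | none => none
      | some (i, _, j) => some (j, i) := by
  rw [bStep_eq]
  obtain ⟨h1, h2, h3⟩ := foldUpd_spec used (Lcat seqs rec) none
  cases hjs : jSearch rec seqs used with
  | none =>
    have hall := (jSearch_none_iff rec seqs used).mp hjs
    rcases h1 with h1 | ⟨e, hmem, hfold, hok⟩
    · exact h1
    · exfalso
      have hc := (mem_Lcat_iff seqs rec e).mp hmem
      obtain ⟨p, hp, hpi, hj1, hj2, hendw⟩ := cand_to_qp rec seqs e hc
      have hq : qp rec used p e.1 = true := by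
        unfold qp
        unfold okU at hok
        rw [hpi, hok, hendw]
        rfl
      have hfalse := hall e.1 ((mem_L100 e.1).mpr ⟨hj1, hj2⟩) p hp
      rw [hq] at hfalse
      exact absurd hfalse (by simp)
  | some t =>
    obtain ⟨i, f, j⟩ := t
    obtain ⟨hjL, hpE, hqp, hmax, hmin⟩ := jSearch_some rec seqs used i f j hjs
    obtain ⟨hj11, hj100⟩ := (mem_L100 j).mp hjL
    have hqp' := hqp
    unfold qp at hqp'
    rw [Bool.and_eq_true] at hqp'
    obtain ⟨hnc', hendj⟩ := hqp'
    have hnc : PySem.Set.contains used i = false := by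
      simpa using hnc'
    have hnot : j = 100 ∨ PySem.Str.endswith rec (PySem.Str.slice f none (some 100)) = false := by
      by_cases hje : j = 100
      · exact Or.inl hje
      · right
        by_contra hcon
        rw [Bool.not_eq_false] at hcon
        have hq100 : qp rec used (i, f) 100 = true := by
          unfold qp
          rw [show ((i, f).1) = i from rfl, hnc, hcon]
          rfl
        have := hmax 100 ((mem_L100 100).mpr (by omega)) (by omega) (i, f) hpE
        rw [hq100] at this
        exact absurd this (by simp)
    have hcand : CandP rec seqs (j, i) := qpmax_to_cand rec seqs (i, f) j hpE hj11 hj100 hendj hnot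
    have hokji : okU used (j, i) = true := by
      unfold okU
      rw [show ((j, i).2) = i from rfl, hnc]
      rfl
    obtain ⟨e, hfold, hdom⟩ := h2 (j, i) ((mem_Lcat_iff seqs rec (j, i)).mpr hcand) hokji
    rcases h1 with h1 | ⟨e', hmem', hfold', hok'⟩
    · rw [h1] at hfold
      exact absurd hfold (by simp)
    · rw [hfold] at hfold'
      have hee : e' = e := (Option.some_inj.mp hfold').symm
      subst hee
      have hce := (mem_Lcat_iff seqs rec e').mp hmem'
      obtain ⟨pe, hpe, hpei, he11, he100, heend⟩ := cand_to_qp rec seqs e' hce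
      have hqe : qp rec used pe e'.1 = true := by
        unfold qp
        unfold okU at hok'
        rw [hpei, hok', heend]
        rfl
      have h1e : e'.1 ≤ j := by
        by_contra hgt
        rw [not_le] at hgt
        have := hmax e'.1 ((mem_L100 e'.1).mpr ⟨he11, he100⟩) hgt pe hpe
        rw [hqe] at this
        exact absurd this (by simp)
      unfold lexGT at hdom
      rw [not_or, not_and, not_lt] at hdom
      obtain ⟨hd1, hd2⟩ := hdom
      have hej : e'.1 = j := by omega
      have hqej : qp rec used pe j = true := by rw [← hej]; exact hqe
      have himin := hmin pe hpe hqej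
      rw [hpei] at himin
      have hei : e'.2 = i := by
        have := hd2 hej.symm
        omega
      have : e' = (j, i) := by
        obtain ⟨a, b⟩ := e'
        simp only [Prod.mk.injEq]
        exact ⟨hej, hei⟩
      rw [hfold, this]

lemma loop_eq (seqs : List String) :
    ∀ (fuel : Nat) (rec : String) (used : PySem.Set Int),
      aLoop seqs fuel rec used = bLoop seqs (buildIndex seqs) fuel rec used := by
  intro fuel
  induction fuel with
  | zero => intro rec used; rfl
  | succ n ih =>
    intro rec used
    show (match find_best_overlap rec seqs used with
          | (none, _, _) => rec
          | (some _, none, _) => rec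
          | (some f, some i, ov) =>
            if ov < 10 then rec
            else aLoop seqs n (rec ++ PySem.Str.slice f (some ov) none) (PySem.Set.add used i))
        = bLoop seqs (buildIndex seqs) (n+1) rec used
    rw [fbo_eq]
    cases hjs : jSearch rec seqs used with
    | none =>
      show rec = bLoop seqs (buildIndex seqs) (n+1) rec used
      unfold bLoop
      rw [step_match, hjs]
    | some t =>
      obtain ⟨i, f, j⟩ := t
      obtain ⟨hjL, hpE, -, -, -⟩ := jSearch_some rec seqs used i f j hjs
      obtain ⟨hj11, -⟩ := (mem_L100 j).mp hjL
      show (if j < 10 then rec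
            else aLoop seqs n (rec ++ PySem.Str.slice f (some j) none) (PySem.Set.add used i))
          = bLoop seqs (buildIndex seqs) (n+1) rec used
      rw [if_neg (by omega)]
      unfold bLoop
      rw [step_match, hjs]
      have hgot : PySem.List.pyGetD seqs i "" = f := by
        rw [PySem.List.mem_enumerate_iff] at hpE
        obtain ⟨k, hk, heq⟩ := hpE
        simp only [Prod.mk.injEq] at heq
        obtain ⟨rfl, rfl⟩ := heq
        simp [PySem.List.pyGetD_natCast, hk]
      simp only [hgot]
      exact ih _ _

-- ===== VERDICT (by name: the statement is the Claim_ definition above) =====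
theorem assemble_fragments_spec : Claim_equal_assemble_fragments := by
  intro seqs _ _
  unfold Spec_assemble_fragments assemble_fragments assemble_fragments_alt
  cases PySem.List.pyGet? seqs 0 with
  | none => rfl
  | some s0 => exact loop_eq seqs seqs.length s0 (PySem.Set.add PySem.Set.empty 0)
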